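-- pv_equiv track=rewrite | github.com/Xiaomut/DataStruct | Leetcode/HuaWei/test.py | getlimmit
-- ===== SOURCE A (Python) =====
-- def getlimmit(records, total):
--     s = 0
--     sum_records = sum(records)
--     if sum_records < total:
--         return -1
--     records.sort()
--     preSum = 0
--     index = 0
--     for i in range(len(records)):
--         preSum = s
--         if i == 0:
--             s = records[i] * len(records)
--         else:
--             s += (records[i] - records[i - 1]) * (len(records) - i)
--         if s == total:
--             return records[i]
--         if s > total:
--             index = i
--             break
--     if index == 0:
--         return total // len(records)
--     num = len(records) - index
--     limmit = (total - preSum) // num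
--     return limmit + records[index - 1]
-- ===== SOURCE B (Python) =====
-- def getlimmit(records, total):
--     if sum(records) < total:
--         return -1
--     records.sort()
--     n = len(records)
--     prefix = [0] * (n + 1)
--     for i, r in enumerate(records):
--         prefix[i + 1] = prefix[i] + r
--
--     def usage(i):
--         return prefix[i] + records[i] * (n - i)
--
--     # usage is non-decreasing on a sorted list and usage(n-1) = sum >= total,
--     # so binary-search the smallest index i with usage(i) >= total.
--     lo, hi = 0, n - 1
--     while lo < hi:
--         mid = (lo + hi) // 2
--         if usage(mid) >= total:
--             hi = mid
--         else:
--             lo = mid + 1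
--     u = usage(lo)
--     if u == total:
--         return records[lo]
--     if lo == 0:
--         return total // n
--     return (total - usage(lo - 1)) // (n - lo) + records[lo - 1]
-- ===== Notes on version B (the rewrite author's own statement) =====
-- stated objective: alternative
-- what changed: Replaces A's linear scan that accumulates usage by running differences (with break/return state) with a prefix-sum array and a binary search for the smallest index whose usage reaches the target; the final formulas read usage off the prefix sums.
import Mathlib
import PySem

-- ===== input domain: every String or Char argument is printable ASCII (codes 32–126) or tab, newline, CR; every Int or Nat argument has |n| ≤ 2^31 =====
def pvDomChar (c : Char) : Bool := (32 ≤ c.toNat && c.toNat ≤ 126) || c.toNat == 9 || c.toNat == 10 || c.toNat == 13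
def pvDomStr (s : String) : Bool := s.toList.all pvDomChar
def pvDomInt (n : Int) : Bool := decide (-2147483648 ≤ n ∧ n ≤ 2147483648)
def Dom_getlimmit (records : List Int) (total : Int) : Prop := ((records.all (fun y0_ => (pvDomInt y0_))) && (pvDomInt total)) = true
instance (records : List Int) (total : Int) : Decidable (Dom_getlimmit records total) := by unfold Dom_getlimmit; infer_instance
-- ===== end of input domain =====

-- B replaces A's running-difference linear scan with a pfx-sum array and a binary
-- search for the first index whose usage meets the target (alternative algorithm; the
-- sort dominates, so no speed claim). Both A and B sort `records` in place (Python);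
-- the equivalence proved here is about the return value.


-- ===== PORT A =====
-- A's for-loop over range(len(records)) with its `return`/`break`: .inl v = early return v,
-- .inr (index, preSum) = loop left normally or via break, carrying the state the tail uses.
-- records[i] is ported as pyGetD … 0: every index the loop touches is in range.
def getlimmitLoopA (rs : List Int) (n total : Int) :
    List Int → Int → Int → Int → (Int ⊕ (Int × Int))
  | [], _s, preSum, index => .inr (index, preSum)
  | i :: rest, s, _preSum, index =>
    let preSum := s
    let s := if i = 0 then (PySem.List.pyGetD rs i 0) * n
             else s + (PySem.List.pyGetD rs i 0 - PySem.List.pyGetD rs (i - 1) 0) * (n - i)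
    if s = total then .inl (PySem.List.pyGetD rs i 0)
    else if s > total then .inr (i, preSum)
    else getlimmitLoopA rs n total rest s preSum index

def getlimmit (records : List Int) (total : Int) : Int :=
  let sum_records := records.sum
  if sum_records < total then -1
  else
    let rs := PySem.List.sorted records (fun x => x) false
    let n : Int := rs.length
    match getlimmitLoopA rs n total (PySem.List.pyRange 0 n 1) 0 0 0 with
    | .inl v => v
    | .inr (index, preSum) =>
      if index = 0 then PySem.Int.floordiv total n
      else
        let num := n - index
        let limmit := PySem.Int.floordiv (total - preSum) num
        limmit + PySem.List.pyGetD rs (index - 1) 0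

-- ===== PORT B =====
-- pfx = [0]; s = 0; for r in records: s += r; pfx.append(s)
def buildPrefixB (rs : List Int) : List Int :=
  (rs.foldl (fun st r => (st.1 + r, st.2 ++ [st.1 + r])) ((0 : Int), [(0 : Int)])).2

def usageB (pfx rs : List Int) (n i : Int) : Int :=
  PySem.List.pyGetD pfx i 0 + PySem.List.pyGetD rs i 0 * (n - i)

-- while lo < hi: mid = (lo + hi) // 2; if usage(mid) >= total: hi = mid else lo = mid + 1
-- (the fuel argument only bounds the iteration count so the recursion is structural;
--  it is called with more fuel than the loop can ever use)
def bsearchB (pfx rs : List Int) (n total : Int) : Nat → Int → Int → Int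
  | 0, lo, _hi => lo
  | fuel + 1, lo, hi =>
    if lo < hi then
      let mid := PySem.Int.floordiv (lo + hi) 2
      if usageB pfx rs n mid ≥ total then
        bsearchB pfx rs n total fuel lo mid
      else
        bsearchB pfx rs n total fuel (mid + 1) hi
    else lo

def getlimmit_alt (records : List Int) (total : Int) : Int :=
  if records.sum < total then -1
  else
    let rs := PySem.List.sorted records (fun x => x) false
    let n : Int := rs.length
    let pfx := buildPrefixB rs
    let lo := bsearchB pfx rs n total (rs.length + 1) 0 (n - 1)
    let u := usageB pfx rs n lo
    if u = total then PySem.List.pyGetD rs lo 0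
    else if lo = 0 then PySem.Int.floordiv total n
    else PySem.Int.floordiv (total - usageB pfx rs n (lo - 1)) (n - lo)
           + PySem.List.pyGetD rs (lo - 1) 0

-- ===== PRECONDITION & SPEC =====
-- Pre_ excludes only records = [] with total ≤ 0, on which Python A raises ZeroDivisionError
-- (total // len(records)) — and Python B raises IndexError there.
def Pre_getlimmit (records : List Int) (total : Int) : Prop := records ≠ [] ∨ 0 < total
instance (records : List Int) (total : Int) : Decidable (Pre_getlimmit records total) := by
  unfold Pre_getlimmit; infer_instance

def pvWitness_getlimmit : List Int × Int := ([1], 1)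

def Spec_getlimmit (records : List Int) (total : Int) (out : Int) : Prop := out = getlimmit_alt records total
instance (records : List Int) (total : Int) (out : Int) : Decidable (Spec_getlimmit records total out) := by unfold Spec_getlimmit; infer_instance

-- ===== CLAIM (what is proved, stated in full; the proofs are below) =====
def Claim_equal_getlimmit : Prop := ∀ (records : List Int) (total : Int), Dom_getlimmit records total → Pre_getlimmit records total → Spec_getlimmit records total (getlimmit records total)

-- ===== LEMMAS AND PROOFS =====

-- uN l k = Python's usage at index k of the sorted list l (spec function for both ports)
def uN (l : List Int) (k : Nat) : Int :=
  (l.take k).sum + l.getD k 0 * ((l.length : Int) - k)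

lemma pyGetD_nat (l : List Int) (j : Nat) : PySem.List.pyGetD l (j : Int) 0 = l.getD j 0 :=
  PySem.List.pyGetD_natCast l j 0

lemma take_succ_sum (l : List Int) (k : Nat) (hk : k < l.length) :
    (l.take (k + 1)).sum = (l.take k).sum + l.getD k 0 := by
  have h1 : l.take (k + 1) = l.take k ++ [l[k]] := by
    rw [List.take_succ]
    simp [List.getElem?_eq_getElem hk]
  rw [List.getD_eq_getElem l 0 hk, h1, List.sum_append, List.sum_cons, List.sum_nil]
  ring

lemma uN_zero (l : List Int) : uN l 0 = l.getD 0 0 * (l.length : Int) := by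
  simp [uN]

lemma uN_step (l : List Int) (k : Nat) (hk : k + 1 < l.length) :
    uN l (k + 1) = uN l k + (l.getD (k + 1) 0 - l.getD k 0) * ((l.length : Int) - (k + 1)) := by
  unfold uN
  rw [take_succ_sum l k (by omega)]
  push_cast
  ring

lemma uN_last (l : List Int) (hne : l ≠ []) : uN l (l.length - 1) = l.sum := by
  have hlen : l.length - 1 < l.length := by
    cases l with
    | nil => simp at hne
    | cons a t => simp
  have hsplit : l = l.take (l.length - 1) ++ l.drop (l.length - 1) := (List.take_append_drop _ l).symm
  have hdrop : l.drop (l.length - 1) = [l[l.length - 1]] := by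
    rw [List.drop_eq_getElem_cons hlen]
    have h2 : l.drop (l.length - 1 + 1) = [] := by
      apply List.drop_eq_nil_of_le; omega
    rw [h2]
  unfold uN
  rw [List.getD_eq_getElem l 0 hlen]
  have hcast : ((l.length : Int) - (l.length - 1 : Nat)) = 1 := by
    have : 1 ≤ l.length := by omega
    push_cast [this]; ring
  rw [hcast]
  conv_rhs => rw [hsplit]
  rw [List.sum_append, hdrop]
  simp

lemma uN_mono (l : List Int) (hl : l.Pairwise (· ≤ ·)) :
    ∀ (q p : Nat), p ≤ q → q < l.length → uN l p ≤ uN l q := by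
  intro q
  induction q with
  | zero =>
    intro p hpq _
    have : p = 0 := by omega
    subst this; exact le_refl _
  | succ m ih =>
    intro p hpq hq
    rcases Nat.lt_or_ge p (m + 1) with h | h
    · have hle : uN l p ≤ uN l m := ih p (by omega) (by omega)
      have hstep := uN_step l m hq
      have hgetle : l.getD m 0 ≤ l.getD (m + 1) 0 := by
        rw [List.getD_eq_getElem l 0 (by omega), List.getD_eq_getElem l 0 hq]
        exact List.pairwise_iff_getElem.mp hl m (m + 1) (by omega) hq (by omega)
      nlinarith [hstep, hgetle, hle]
    · have : p = m + 1 := by omega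
      subst this; exact le_refl _

lemma loopA_cons_zero (rs : List Int) (n total : Int) (rest : List Int) (s preSum index : Int) :
    getlimmitLoopA rs n total ((0 : Int) :: rest) s preSum index =
      (if PySem.List.pyGetD rs 0 0 * n = total then Sum.inl (PySem.List.pyGetD rs 0 0)
       else if PySem.List.pyGetD rs 0 0 * n > total then Sum.inr (0, s)
       else getlimmitLoopA rs n total rest (PySem.List.pyGetD rs 0 0 * n) s index) := by
  simp [getlimmitLoopA]

lemma loopA_cons_ne (rs : List Int) (n total i : Int) (rest : List Int) (s preSum index : Int)
    (hi : i ≠ 0) :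
    getlimmitLoopA rs n total (i :: rest) s preSum index =
      (if s + (PySem.List.pyGetD rs i 0 - PySem.List.pyGetD rs (i - 1) 0) * (n - i) = total
         then Sum.inl (PySem.List.pyGetD rs i 0)
       else if s + (PySem.List.pyGetD rs i 0 - PySem.List.pyGetD rs (i - 1) 0) * (n - i) > total
         then Sum.inr (i, s)
       else getlimmitLoopA rs n total rest
              (s + (PySem.List.pyGetD rs i 0 - PySem.List.pyGetD rs (i - 1) 0) * (n - i)) s index) := by
  simp [getlimmitLoopA, hi]

lemma loopA_run (l : List Int) (total : Int) (k : Nat)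
    (hk : k < l.length) (hku : total ≤ uN l k)
    (hmin : ∀ j : Nat, j < k → uN l j < total) :
    ∀ (d i : Nat) (s preSum index : Int), k - i = d → i ≤ k →
      (s = if i = 0 then 0 else uN l (i - 1)) →
      getlimmitLoopA l (l.length : Int) total
          (PySem.List.pyRange (i : Int) (l.length : Int) 1) s preSum index =
        (if uN l k = total then Sum.inl (l.getD k 0)
         else Sum.inr ((k : Int), if k = 0 then 0 else uN l (k - 1))) := by
  intro d
  induction d with
  | zero =>
    intro i s preSum index hd hik hs
    have hik' : i = k := by omega
    subst hik'
    rw [PySem.List.pyRange_one_cons (by exact_mod_cast hk)]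
    by_cases h0 : i = 0
    · subst h0
      rw [show ((0 : Nat) : Int) = 0 by norm_num, loopA_cons_zero, PySem.List.pyGetD_zero]
      rw [← uN_zero l]
      by_cases heq : uN l 0 = total
      · simp [heq]
      · have hgt : uN l 0 > total := by omega
        rw [if_neg heq, if_pos hgt, if_neg heq]
        simp [hs]
    · have hne : ((i : Nat) : Int) ≠ 0 := by exact_mod_cast h0
      rw [loopA_cons_ne l _ total _ _ s preSum index hne]
      have hstep : s + (PySem.List.pyGetD l (i : Int) 0 - PySem.List.pyGetD l ((i : Int) - 1) 0)
          * ((l.length : Int) - (i : Int)) = uN l i := by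
        have hi1 : ((i : Int) - 1) = ((i - 1 : Nat) : Int) := by omega
        rw [hi1, pyGetD_nat, pyGetD_nat, hs, if_neg h0]
        have hst := uN_step l (i - 1) (by omega)
        have hii : i - 1 + 1 = i := by omega
        rw [hii] at hst
        rw [hst]
        congr 2 <;> push_cast <;> omega
      rw [hstep]
      by_cases heq : uN l i = total
      · simp [heq, pyGetD_nat]
      · have hgt : uN l i > total := by omega
        rw [if_neg heq, if_pos hgt, if_neg heq]
        rw [hs, if_neg h0]
  | succ d ih =>
    intro i s preSum index hd hik hs
    have hilt : i < k := by omega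
    have hiltn : i < l.length := by omega
    rw [PySem.List.pyRange_one_cons (by exact_mod_cast hiltn)]
    have hlt : uN l i < total := hmin i hilt
    by_cases h0 : i = 0
    · subst h0
      rw [show ((0 : Nat) : Int) = 0 by norm_num, loopA_cons_zero, PySem.List.pyGetD_zero, ← uN_zero l]
      rw [if_neg (by omega), if_neg (by omega)]
      rw [show ((0 : Int) + 1) = ((1 : Nat) : Int) by norm_num]
      exact ih 1 (uN l 0) s index (by omega) (by omega) (by norm_num)
    · have hne : ((i : Nat) : Int) ≠ 0 := by exact_mod_cast h0
      rw [loopA_cons_ne l _ total _ _ s preSum index hne]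
      have hstep : s + (PySem.List.pyGetD l (i : Int) 0 - PySem.List.pyGetD l ((i : Int) - 1) 0)
          * ((l.length : Int) - (i : Int)) = uN l i := by
        have hi1 : ((i : Int) - 1) = ((i - 1 : Nat) : Int) := by omega
        rw [hi1, pyGetD_nat, pyGetD_nat, hs, if_neg h0]
        have hst := uN_step l (i - 1) (by omega)
        have hii : i - 1 + 1 = i := by omega
        rw [hii] at hst
        rw [hst]
        congr 2 <;> push_cast <;> omega
      rw [hstep]
      rw [if_neg (by omega), if_neg (by omega)]
      rw [show ((i : Int) + 1) = ((i + 1 : Nat) : Int) by push_cast; ring]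
      refine ih (i + 1) (uN l i) s index (by omega) (by omega) ?_
      rw [if_neg (by omega)]
      simp

lemma buildPrefix_general (rs : List Int) : ∀ (a : Int) (p : List Int),
    (rs.foldl (fun st r => (st.1 + r, st.2 ++ [st.1 + r])) (a, p)).2 =
      p ++ (List.range rs.length).map (fun i => a + (rs.take (i + 1)).sum) := by
  induction rs with
  | nil => intro a p; simp
  | cons r t ih =>
    intro a p
    simp only [List.foldl_cons, List.length_cons]
    rw [ih (a + r) (p ++ [a + r])]
    rw [List.range_succ_eq_map]
    simp only [List.map_cons, List.map_map]
    rw [List.append_assoc]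
    congr 1
    simp only [List.take_succ_cons, List.sum_cons, List.singleton_append]
    congr 1
    · simp
    · apply List.map_congr_left
      intro i _
      simp [Function.comp]
      ring

lemma pfx_getD (rs : List Int) (j : Nat) (hj : j ≤ rs.length) :
    PySem.List.pyGetD (buildPrefixB rs) (j : Int) 0 = (rs.take j).sum := by
  rw [pyGetD_nat]
  unfold buildPrefixB
  rw [buildPrefix_general rs 0 [0]]
  cases j with
  | zero => simp
  | succ m =>
    simp only [List.singleton_append, List.getD_cons_succ]
    rw [PySem.List.getD_map_range (fun i => 0 + (rs.take (i + 1)).sum) rs.length m 0 (by omega)]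
    simp

lemma usageB_eq (rs : List Int) (j : Nat) (hj : j < rs.length) :
    usageB (buildPrefixB rs) rs (rs.length : Int) (j : Int) = uN rs j := by
  unfold usageB uN
  rw [pfx_getD rs j (by omega), pyGetD_nat]

lemma bsearch_run (l : List Int) (hl : l.Pairwise (· ≤ ·)) (total : Int) (k : Nat)
    (hk : k < l.length) (hku : total ≤ uN l k)
    (hmin : ∀ j : Nat, j < k → uN l j < total) :
    ∀ (fuel lo hi : Nat), hi - lo < fuel → lo ≤ k → k ≤ hi → hi < l.length →
      bsearchB (buildPrefixB l) l (l.length : Int) total fuel (lo : Int) (hi : Int) = (k : Int) := by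
  intro fuel
  induction fuel with
  | zero =>
    intro lo hi hd hlo hhi hn
    exact absurd hd (by omega)
  | succ d ih =>
    intro lo hi hd hlo hhi hn
    by_cases hcase : lo < hi
    case neg =>
      show (if ((lo : Int) < (hi : Int)) then _ else (lo : Int)) = ((k : Nat) : Int)
      rw [if_neg (by omega : ¬((lo : Int) < (hi : Int)))]
      exact_mod_cast congrArg (fun x : Nat => (x : Int)) (by omega : lo = k)
    case pos =>
    have hlth : (lo : Int) < (hi : Int) := by exact_mod_cast hcase
    show (if ((lo : Int) < (hi : Int)) then
            (if usageB (buildPrefixB l) l (l.length : Int) (PySem.Int.floordiv ((lo : Int) + (hi : Int)) 2) ≥ total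
             then bsearchB (buildPrefixB l) l (l.length : Int) total d (lo : Int) (PySem.Int.floordiv ((lo : Int) + (hi : Int)) 2)
             else bsearchB (buildPrefixB l) l (l.length : Int) total d (PySem.Int.floordiv ((lo : Int) + (hi : Int)) 2 + 1) (hi : Int))
          else (lo : Int)) = (k : Int)
    rw [if_pos hlth]
    have hmid1 := (PySem.Int.floordiv_lt_iff_lt_mul (a := (lo : Int) + hi) (b := 2) (q := (hi : Int)) (by omega)).mpr (by omega)
    have hmid2 := (PySem.Int.le_floordiv_iff_mul_le (a := (lo : Int) + hi) (b := 2) (q := (lo : Int)) (by omega)).mpr (by omega)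
    set midI := PySem.Int.floordiv ((lo : Int) + hi) 2 with hmidI
    have hm0 : 0 ≤ midI := by omega
    set m := midI.toNat with hm
    have hmcast : midI = ((m : Nat) : Int) := by omega
    have hmlt : m < l.length := by omega
    rw [hmcast, usageB_eq l m hmlt]
    by_cases hge : uN l m ≥ total
    · rw [if_pos hge]
      have hkm : k ≤ m := by
        by_contra hh
        exact absurd hge (by simpa using hmin m (by omega))
      exact ih lo m (by omega) hlo hkm (by omega)
    · rw [if_neg hge]
      have hmk : m < k := by
        by_contra hh
        exact hge (le_trans hku (uN_mono l hl m k (by omega) hmlt))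
      rw [show ((m : Nat) : Int) + 1 = ((m + 1 : Nat) : Int) by push_cast; ring]
      exact ih (m + 1) hi (by omega) (by omega) (by omega) (by omega)

-- ===== VERDICT (by name: the statement is the Claim_ definition above) =====
theorem getlimmit_spec : Claim_equal_getlimmit := by
  intro records total _hdom hpre
  unfold Spec_getlimmit getlimmit getlimmit_alt
  by_cases hlt : records.sum < total
  · simp [hlt]
  · simp only [if_neg hlt]
    set l := PySem.List.sorted records (fun x => x) false with hldef
    have hperm : l.Perm records := PySem.List.sorted_perm records (fun x => x) false
    have hsum : l.sum = records.sum := hperm.sum_eq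
    have hpw : l.Pairwise (· ≤ ·) := by
      simpa using PySem.List.sorted_pairwise records (fun x => x)
    have hne : l ≠ [] := by
      intro h
      have hrec : records = [] := by
        rw [h] at hperm
        exact hperm.nil_eq.symm
      rcases hpre with h1 | h2
      · exact h1 hrec
      · rw [hrec] at hlt; simp at hlt; omega
    have hlen : 1 ≤ l.length := List.length_pos_iff.mpr hne
    have hex : ∃ m, m < l.length ∧ total ≤ uN l m :=
      ⟨l.length - 1, by omega, by rw [uN_last l hne, hsum]; omega⟩
    set k := Nat.find hex with hkdef
    have hkspec := Nat.find_spec hex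
    have hmin : ∀ j : Nat, j < k → uN l j < total := by
      intro j hj
      have hh := Nat.find_min hex hj
      push_neg at hh
      have hjn : j < l.length := by omega
      exact lt_of_not_ge (fun hc => absurd (hh hjn) (not_lt.mpr hc))
    have hA := loopA_run l total k hkspec.1 hkspec.2 hmin k 0 0 0 0 (by omega) (by omega) (by simp)
    have hB := bsearch_run l hpw total k hkspec.1 hkspec.2 hmin (l.length + 1) 0 (l.length - 1)
      (by omega) (by omega) (by omega) (by omega)
    norm_cast at hA hB
    have hB' : bsearchB (buildPrefixB l) l (l.length : Int) total (l.length + 1) 0 ((l.length : Int) - 1) = (k : Int) := by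
      have hc : ((l.length : Int) - 1) = ((l.length - 1 : Nat) : Int) := by omega
      rw [hc]; exact_mod_cast hB
    rw [hA, hB']
    by_cases heq : uN l k = total
    · rw [if_pos heq]
      rw [usageB_eq l k hkspec.1, if_pos heq, pyGetD_nat]
    · rw [if_neg heq]
      rw [usageB_eq l k hkspec.1, if_neg heq]
      show (if (k : Int) = 0 then PySem.Int.floordiv total (l.length : Int)
            else PySem.Int.floordiv (total - (if k = 0 then 0 else uN l (k - 1))) ((l.length : Int) - (k : Int))
                   + PySem.List.pyGetD l ((k : Int) - 1) 0) = _
      by_cases hk0 : k = 0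
      · rw [hk0]
        norm_num
      · have hkne : ((k : Nat) : Int) ≠ 0 := by exact_mod_cast hk0
        rw [if_neg hkne, if_neg hkne, if_neg hk0]
        rw [show ((k : Int) - 1) = ((k - 1 : Nat) : Int) by omega]
        rw [usageB_eq l (k - 1) (by omega), pyGetD_nat]
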